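-- pv_equiv track=rewrite | github.com/ckoons/BubbleSpacetimeTheory | play/toy_354_cycle_commitment.py | find_backbone
-- ===== SOURCE A (Python) =====
-- def find_backbone(solutions, n):
--     """Variables constant across all solutions."""
--     if not solutions:
--         return set()
--     backbone = set()
--     for v in range(n):
--         vals = set(sol[v] for sol in solutions)
--         if len(vals) == 1:
--             backbone.add(v)
--     return backbone
-- ===== SOURCE B (Python) =====
-- def find_backbone(solutions, n):
--     """Variables constant across all solutions."""
--     if not solutions:
--         return set()
--     ref = solutions[0]
--     candidates = set(range(n))
--     for sol in solutions[1:]: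
--         candidates = {v for v in candidates if sol[v] == ref[v]}
--     return candidates
-- ===== Notes on version B (the rewrite author's own statement) =====
-- stated objective: alternative
-- what changed: B sweeps solution-major with a shrinking candidate set (compare each remaining solution against the first, eliminating mismatching variables), instead of A's variable-major pass that builds a value set per variable.
import Mathlib
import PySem

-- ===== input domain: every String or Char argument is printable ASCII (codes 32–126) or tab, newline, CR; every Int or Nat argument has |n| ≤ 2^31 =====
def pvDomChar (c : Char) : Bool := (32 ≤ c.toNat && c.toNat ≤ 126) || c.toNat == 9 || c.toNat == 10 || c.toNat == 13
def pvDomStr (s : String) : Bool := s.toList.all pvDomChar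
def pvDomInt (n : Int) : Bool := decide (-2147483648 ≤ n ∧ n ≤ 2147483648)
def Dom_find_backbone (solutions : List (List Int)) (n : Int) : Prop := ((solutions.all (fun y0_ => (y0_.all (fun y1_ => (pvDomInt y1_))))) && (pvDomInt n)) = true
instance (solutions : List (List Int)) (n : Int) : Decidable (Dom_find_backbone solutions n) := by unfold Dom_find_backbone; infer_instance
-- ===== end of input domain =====

-- B eliminates variables solution-major with a shrinking candidate set instead of A's
-- per-variable value-set construction (objective: alternative; return value only).

-- ===== PORT A =====
def find_backbone (solutions : List (List Int)) (n : Int) : List Int :=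
  if solutions = [] then []
  else
    (PySem.List.pyRange 0 n 1).foldl
      (fun backbone v =>
        let vals : PySem.Set Int :=
          PySem.Set.ofList (solutions.map (fun sol => PySem.List.pyGetD sol v 0))
        if vals.length = 1 then PySem.Set.add backbone v else backbone)
      []

-- ===== PORT B =====
def find_backbone_alt (solutions : List (List Int)) (n : Int) : List Int :=
  match solutions with
  | [] => []
  | ref :: rest =>
    rest.foldl
      (fun cands sol =>
        cands.filter (fun v => PySem.List.pyGetD sol v 0 == PySem.List.pyGetD ref v 0))
      (PySem.List.pyRange 0 n 1)

-- ===== PRECONDITION & SPEC =====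
-- Pre_ excludes exactly the inputs on which A raises IndexError: some solution row
-- shorter than n (with solutions nonempty and n positive).
def Pre_find_backbone (solutions : List (List Int)) (n : Int) : Prop :=
  ∀ sol ∈ solutions, n ≤ (sol.length : Int)
instance (solutions : List (List Int)) (n : Int) : Decidable (Pre_find_backbone solutions n) := by
  unfold Pre_find_backbone; infer_instance
def pvWitness_find_backbone : List (List Int) × Int := ([[1, 2], [1, 3]], 2)

def Spec_find_backbone (solutions : List (List Int)) (n : Int) (out : List Int) : Prop := out = find_backbone_alt solutions n
instance (solutions : List (List Int)) (n : Int) (out : List Int) : Decidable (Spec_find_backbone solutions n out) := by unfold Spec_find_backbone; infer_instance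

-- ===== CLAIM (what is proved, stated in full; the proofs are below) =====
def Claim_equal_find_backbone : Prop := ∀ (solutions : List (List Int)) (n : Int), Dom_find_backbone solutions n → Pre_find_backbone solutions n → Spec_find_backbone solutions n (find_backbone solutions n)

-- ===== LEMMAS AND PROOFS =====

-- A's accumulation of fresh elements into a set is a filter of the (nodup) index list.
theorem foldl_add_if_eq_filter (p : Int → Prop) [DecidablePred p] :
    ∀ (l : List Int) (acc : List Int), l.Nodup → (∀ v ∈ l, v ∉ acc) →
      l.foldl (fun b v => if p v then PySem.Set.add b v else b) acc
        = acc ++ l.filter (fun v => decide (p v)) := by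
  intro l
  induction l with
  | nil => intro acc _ _; simp
  | cons a t ih =>
    intro acc hnd hfresh
    have hna : a ∉ acc := hfresh a (by simp)
    have hadd : PySem.Set.add acc a = acc ++ [a] := by
      simp [PySem.Set.add, PySem.Set.contains, hna]
    have hnd' : t.Nodup := (List.nodup_cons.mp hnd).2
    have hat : a ∉ t := (List.nodup_cons.mp hnd).1
    by_cases hp : p a
    · have hfresh' : ∀ v ∈ t, v ∉ acc ++ [a] := by
        intro v hv
        simp only [List.mem_append, List.mem_singleton]
        rintro (h | rfl)
        · exact hfresh v (by simp [hv]) h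
        · exact hat hv
      rw [List.foldl_cons, if_pos hp, hadd, ih _ hnd' hfresh']
      simp [hp]
    · have hfresh' : ∀ v ∈ t, v ∉ acc := fun v hv => hfresh v (by simp [hv])
      rw [List.foldl_cons, if_neg hp, ih _ hnd' hfresh']
      simp [hp]

-- B's repeated filtering is one filter with the conjunction of all tests.
theorem foldl_filter_eq_filter_all (f : List Int → Int → Bool) :
    ∀ (rest : List (List Int)) (init : List Int),
      rest.foldl (fun c sol => c.filter (f sol)) init
        = init.filter (fun v => rest.all (fun sol => f sol v)) := by
  intro rest
  induction rest with
  | nil => intro init; simp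
  | cons a t ih =>
    intro init
    simp only [List.foldl_cons, ih, List.filter_filter]
    apply List.filter_congr
    intro v _
    simp [Bool.and_comm]

-- A nodup list containing a whose members are all a is [a].
theorem nodup_all_eq_singleton {a : Int} :
    ∀ (s : List Int), s.Nodup → a ∈ s → (∀ x ∈ s, x = a) → s = [a] := by
  intro s hnd ha hall
  match s, hnd, ha with
  | [x], _, ha => simp_all
  | x :: y :: t, hnd, _ =>
    have hx : x = a := hall x (by simp)
    have hy : y = a := hall y (by simp)
    exfalso
    exact (List.nodup_cons.mp hnd).1 (by simp [hx, hy])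

theorem len_ofList_cons_eq_one_iff (a : Int) (l : List Int) :
    (PySem.Set.ofList (a :: l)).length = 1 ↔ ∀ x ∈ l, x = a := by
  constructor
  · intro h x hx
    obtain ⟨b, hb⟩ := List.length_eq_one_iff.mp h
    have ha : a ∈ PySem.Set.ofList (a :: l) := (PySem.Set.mem_ofList _ _).mpr (by simp)
    have hxm : x ∈ PySem.Set.ofList (a :: l) := (PySem.Set.mem_ofList _ _).mpr (by simp [hx])
    rw [hb] at ha hxm
    simp only [List.mem_singleton] at ha hxm
    rw [hxm, ha]
  · intro hall
    have h1 : PySem.Set.ofList (a :: l) = [a] := by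
      apply nodup_all_eq_singleton
      · exact PySem.Set.nodup_ofList _
      · exact (PySem.Set.mem_ofList _ _).mpr (by simp)
      · intro x hx
        rcases List.mem_cons.mp ((PySem.Set.mem_ofList _ _).mp hx) with h | h
        · exact h
        · exact hall x h
    simp [h1]

-- ===== VERDICT (by name: the statement is the Claim_ definition above) =====
theorem find_backbone_spec : Claim_equal_find_backbone := by
  intro solutions n _ _
  unfold Spec_find_backbone
  match solutions with
  | [] => rfl
  | ref :: rest =>
    have hb : find_backbone_alt (ref :: rest) n
        = (PySem.List.pyRange 0 n 1).filter
            (fun v => rest.all (fun sol =>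
              PySem.List.pyGetD sol v 0 == PySem.List.pyGetD ref v 0)) := by
      show rest.foldl _ _ = _
      rw [foldl_filter_eq_filter_all]
    rw [hb]
    unfold find_backbone
    rw [if_neg (by simp),
        foldl_add_if_eq_filter _ _ [] (PySem.List.nodup_pyRange_one 0 n) (by simp)]
    simp only [List.nil_append]
    apply List.filter_congr
    intro v _
    simp only [List.map_cons]
    rw [Bool.eq_iff_iff]
    simp [len_ofList_cons_eq_one_iff, List.all_eq_true]
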